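-- pv_equiv track=rewrite | github.com/lzmgl/PS | 2024-01/BOJ1407/BOJ1407.py | f
-- ===== SOURCE A (Python) =====
-- def f(x):
--     ans=0
--     y=0
--     i=1
--     while x>0:
--         if x&1:
--             y=x//2 + 1
--         else:
--             y=x//2
--         ans+=y*i
--         x-=y
--         i*=2
--     return ans
-- ===== SOURCE B (Python) =====
-- def f(x):
--     # Abel-summation form: result = x + sum_{j>=1} 2^(j-1) * (x >> j), for x > 0.
--     if x <= 0:
--         return 0
--     ans = x
--     t = x >> 1
--     p = 1
--     while t > 0:
--         ans += p * t
--         p *= 2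
--         t >>= 1
--     return ans
-- ===== Notes on version B (the rewrite author's own statement) =====
-- stated objective: alternative
-- what changed: Replaces A's loop that repeatedly subtracts the ceiling half from a shrinking x by the Abel-summation form: start from x itself and, for each bit position, add the right-shifted value times a doubling power-of-two weight, with no parity branch and no subtraction.
import Mathlib
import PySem

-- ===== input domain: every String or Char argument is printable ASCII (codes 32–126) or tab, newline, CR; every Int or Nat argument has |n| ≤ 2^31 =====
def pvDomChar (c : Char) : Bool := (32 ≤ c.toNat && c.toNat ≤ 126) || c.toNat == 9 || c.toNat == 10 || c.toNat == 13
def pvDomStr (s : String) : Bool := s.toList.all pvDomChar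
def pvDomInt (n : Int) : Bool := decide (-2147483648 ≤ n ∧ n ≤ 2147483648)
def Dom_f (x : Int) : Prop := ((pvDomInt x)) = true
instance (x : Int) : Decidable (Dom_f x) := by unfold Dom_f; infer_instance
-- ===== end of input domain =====

-- B replaces A's subtract-the-ceiling-half-from-shrinking-x loop by the Abel-summation form: x plus, per bit
-- position, the right-shifted value times a doubling weight (alternative decomposition, same cost).

-- ===== PORT A =====
-- while x>0: y = x//2+1 if x&1 else x//2; ans += y*i; x -= y; i *= 2
def fLoop (x ans i : Int) : Int :=
  if h : 0 < x then
    let y : Int := if PySem.Int.band x 1 ≠ 0 then PySem.Int.floordiv x 2 + 1 else PySem.Int.floordiv x 2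
    fLoop (x - y) (ans + y * i) (i * 2)
  else ans
termination_by x.toNat
decreasing_by
  simp only [PySem.Int.floordiv_eq_ediv_of_pos (a := x) (by omega : (0:Int) < 2)]
  split
  · omega
  · rename_i hb
    rw [Ne, not_not, PySem.Int.band_one, PySem.Int.mod_eq_emod_of_pos (by omega : (0:Int) < 2)] at hb
    omega

def f (x : Int) : Int := fLoop x 0 1

-- ===== PORT B =====
-- t >> 1 is Python's arithmetic right shift = floor division by 2 (exact on all ints)
def fAltLoop (ans p t : Int) : Int :=
  if h : 0 < t then fAltLoop (ans + p * t) (p * 2) (PySem.Int.floordiv t 2) else ans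
termination_by t.toNat
decreasing_by
  simp only [PySem.Int.floordiv_eq_ediv_of_pos (a := t) (by omega : (0:Int) < 2)]
  omega

def f_alt (x : Int) : Int :=
  if x ≤ 0 then 0 else fAltLoop x 1 (PySem.Int.floordiv x 2)

-- ===== PRECONDITION & SPEC =====
def Spec_f (x : Int) (out : Int) : Prop := out = f_alt x
instance (x : Int) (out : Int) : Decidable (Spec_f x out) := by unfold Spec_f; infer_instance

-- ===== CLAIM (what is proved, stated in full; the proofs are below) =====
def Claim_equal_f : Prop := ∀ (x : Int), Dom_f x → Spec_f x (f x)

-- ===== LEMMAS AND PROOFS =====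

-- closed forms of the two loops
def Fm (x : Int) : Int := if 0 < x then (x - x / 2) + 2 * Fm (x / 2) else 0
termination_by x.toNat
decreasing_by omega

def Gm (t : Int) : Int := if 0 < t then t + 2 * Gm (t / 2) else 0
termination_by t.toNat
decreasing_by omega

lemma fLoop_eq (n : Nat) : ∀ x : Int, x.toNat ≤ n → ∀ ans i : Int,
    fLoop x ans i = ans + i * Fm x := by
  induction n with
  | zero =>
    intro x hx ans i
    rw [fLoop, Fm]
    have hx0 : ¬ 0 < x := by omega
    simp [hx0]
  | succ n ih =>
    intro x hx ans i
    rw [fLoop, Fm]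
    by_cases hp : 0 < x
    · simp only [hp, dif_pos, if_pos]
      have h2 : (0:Int) < 2 := by omega
      rw [PySem.Int.band_one, PySem.Int.mod_eq_emod_of_pos h2,
        PySem.Int.floordiv_eq_ediv_of_pos h2]
      have hmod := Int.emod_emod_of_dvd x (dvd_refl 2)
      have hdm : 2 * (x / 2) + x % 2 = x := Int.mul_ediv_add_emod x 2
      have hmlt : x % 2 < 2 := Int.emod_lt_of_pos x h2
      have hm0 : 0 ≤ x % 2 := Int.emod_nonneg x (by omega)
      by_cases hodd : x % 2 ≠ 0
      · rw [if_pos hodd]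
        have hsub : x - (x / 2 + 1) = x / 2 := by omega
        rw [hsub, ih (x / 2) (by omega)]
        have hy : x / 2 + 1 = x - x / 2 := by omega
        rw [hy]; ring
      · rw [if_neg hodd]
        rw [not_not] at hodd
        have hsub : x - x / 2 = x / 2 := by omega
        rw [hsub, ih (x / 2) (by omega)]
        ring
    · simp [hp]

lemma fAltLoop_eq (n : Nat) : ∀ t : Int, t.toNat ≤ n → ∀ ans p : Int,
    fAltLoop ans p t = ans + p * Gm t := by
  induction n with
  | zero =>
    intro t ht ans p
    rw [fAltLoop, Gm]
    have ht0 : ¬ 0 < t := by omega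
    simp [ht0]
  | succ n ih =>
    intro t ht ans p
    rw [fAltLoop, Gm]
    by_cases hp : 0 < t
    · simp only [hp, dif_pos, if_pos,
        PySem.Int.floordiv_eq_ediv_of_pos (by omega : (0:Int) < 2)]
      rw [ih (t / 2) (by omega)]
      ring
    · simp [hp]

lemma Fm_eq_Gm (n : Nat) : ∀ x : Int, x.toNat ≤ n → 0 ≤ x → Fm x = x + Gm (x / 2) := by
  induction n with
  | zero =>
    intro x hx h0
    have hx0 : x = 0 := by omega
    subst hx0
    rw [Fm, Gm]; norm_num
  | succ n ih =>
    intro x hx h0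
    rw [Fm]
    by_cases hp : 0 < x
    · rw [if_pos hp, ih (x / 2) (by omega) (by omega)]
      by_cases hq : 0 < x / 2
      · have hg : Gm (x / 2) = x / 2 + 2 * Gm (x / 2 / 2) := by rw [Gm, if_pos hq]
        rw [hg]; ring
      · have hq0 : x / 2 = 0 := by omega
        have g0 : Gm 0 = 0 := by rw [Gm]; norm_num
        rw [hq0]
        norm_num [g0]
    · have hx0 : x = 0 := by omega
      subst hx0
      have g0 : Gm 0 = 0 := by rw [Gm]; norm_num
      rw [if_neg hp, show (0:Int) / 2 = 0 by norm_num, g0]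
      norm_num

-- ===== VERDICT (by name: the statement is the Claim_ definition above) =====
theorem f_spec : Claim_equal_f := by
  intro x _
  unfold Spec_f f f_alt
  by_cases hp : x ≤ 0
  · rw [fLoop]
    simp [hp, show ¬ 0 < x by omega]
  · simp only [hp, if_neg, not_false_iff]
    rw [fLoop_eq x.toNat x (le_refl _) 0 1,
      fAltLoop_eq (PySem.Int.floordiv x 2).toNat _ (le_refl _) x 1,
      PySem.Int.floordiv_eq_ediv_of_pos (by omega : (0:Int) < 2),
      Fm_eq_Gm x.toNat x (le_refl _) (by omega)]
    ring
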